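-- pv_equiv track=rewrite | github.com/bibleman-stan/readers-bofm | build_book.py | _extract_visible_text
-- ===== SOURCE A (Python) =====
-- def _extract_visible_text(html):
--     """Strip HTML tags to get visible text only."""
--     result = []
--     i = 0
--     while i < len(html):
--         if html[i] == '<':
--             end = html.find('>', i)
--             if end == -1:
--                 break
--             i = end + 1
--         else:
--             result.append(html[i])
--             i += 1
--     return ''.join(result)
-- ===== SOURCE B (Python) =====
-- def _extract_visible_text(html):
--     """Strip HTML tags: split on '<'; each later chunk keeps only its text after the first '>'."""
--     first, *rest = html.split('<')
--     return first + ''.join(part.partition('>')[2] for part in rest)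
-- ===== Notes on version B (the rewrite author's own statement) =====
-- stated objective: idiomatic
-- what changed: Replaced the index-based while loop with explicit find/break control flow by a stateless one-expression pipeline: split on '<', keep the text after the first '>' of each later chunk, join; str.split/partition/join run at C level instead of a per-character Python loop.
import Mathlib
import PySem

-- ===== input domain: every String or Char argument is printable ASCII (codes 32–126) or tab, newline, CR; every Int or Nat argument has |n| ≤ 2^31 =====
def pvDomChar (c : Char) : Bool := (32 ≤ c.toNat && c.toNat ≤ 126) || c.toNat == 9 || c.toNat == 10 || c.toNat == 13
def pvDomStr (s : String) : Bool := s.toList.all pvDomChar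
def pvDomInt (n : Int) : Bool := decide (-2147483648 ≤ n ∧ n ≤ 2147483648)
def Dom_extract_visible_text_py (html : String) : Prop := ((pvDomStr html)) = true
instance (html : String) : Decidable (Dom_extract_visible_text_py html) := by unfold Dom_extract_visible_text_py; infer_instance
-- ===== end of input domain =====

-- B replaces A's index-based while loop (find/break state) by a stateless split-on-'<' pipeline; idiomatic, same cost.

-- ===== PORT A =====
-- html.find('>', i): searching from the '<' itself is the same as searching the tail
-- after it ('<' ≠ '>'); skipGt drops up to and including the first '>', none = not found.
def skipGt : List Char → Option (List Char)
  | [] => none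
  | c :: rest => if c = '>' then some rest else skipGt rest

theorem skipGt_length : ∀ (cs r : List Char), skipGt cs = some r → r.length < cs.length := by
  intro cs
  induction cs with
  | nil => intro r h; simp [skipGt] at h
  | cons c rest ih =>
    intro r h
    simp only [skipGt] at h
    split at h
    · cases h; simp
    · have := ih r h; simp; omega

-- the while loop of A, character by character: on '<' find '>' (break and drop the
-- rest if absent), otherwise append the character.
def auxA : List Char → List Char
  | [] => []
  | c :: rest =>
    if c = '<' then
      match h : skipGt rest with
      | none => []
      | some rest' => auxA rest'
    else c :: auxA rest
termination_by cs => cs.length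
decreasing_by
  · exact Nat.lt_succ_of_lt (skipGt_length _ _ h)
  · simp

def extract_visible_text_py (html : String) : String :=
  String.ofList (auxA html.toList)

-- ===== PORT B =====
-- html.split('<'), ported by hand (exact: Python's split keeps empty chunks).
def splitLt : List Char → List (List Char)
  | [] => [[]]
  | c :: rest =>
    if c = '<' then [] :: splitLt rest
    else
      match splitLt rest with
      | [] => [[c]]
      | h :: t => (c :: h) :: t

-- part.partition('>')[2]: text after the first '>', empty if none (exact).
def afterGt (part : List Char) : List Char :=
  (part.dropWhile (· ≠ '>')).drop 1

def extract_visible_text_py_alt (html : String) : String :=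
  match splitLt html.toList with
  | [] => ""
  | first :: rest => String.ofList (first ++ (rest.map afterGt).flatten)

-- ===== PRECONDITION & SPEC =====
def Spec_extract_visible_text_py (html : String) (out : String) : Prop := out = extract_visible_text_py_alt html
instance (html : String) (out : String) : Decidable (Spec_extract_visible_text_py html out) := by unfold Spec_extract_visible_text_py; infer_instance

-- ===== CLAIM (what is proved, stated in full; the proofs are below) =====
def Claim_equal_extract_visible_text_py : Prop := ∀ (html : String), Dom_extract_visible_text_py html → Spec_extract_visible_text_py html (extract_visible_text_py html)

-- ===== LEMMAS AND PROOFS =====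

theorem splitLt_ne_nil (cs : List Char) : splitLt cs ≠ [] := by
  cases cs with
  | nil => simp [splitLt]
  | cons c rest =>
    simp only [splitLt]
    split
    · simp
    · split <;> simp

-- B's value as a function of the split, in the shape used by the induction.
def gB (parts : List (List Char)) : List Char :=
  match parts with
  | [] => []
  | first :: rest => first ++ (rest.map afterGt).flatten

-- Combined invariant, proved by strong induction on the length:
--   Main: auxA cs = gB (splitLt cs)           (outside a tag)
--   Tag:  flatten (map afterGt (splitLt cs)) = the break-or-resume A performs inside a tag
theorem main_and_tag : ∀ (n : ℕ) (cs : List Char), cs.length ≤ n →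
    (auxA cs = gB (splitLt cs)) ∧
    (((splitLt cs).map afterGt).flatten =
      match skipGt cs with
      | none => []
      | some r => auxA r) := by
  intro n
  induction n with
  | zero =>
    intro cs h
    have : cs = [] := List.length_eq_zero_iff.mp (Nat.le_zero.mp h)
    subst this
    constructor <;> simp [auxA, splitLt, gB, afterGt, skipGt]
  | succ n ih =>
    intro cs h
    cases cs with
    | nil => constructor <;> simp [auxA, splitLt, gB, afterGt, skipGt]
    | cons c rest =>
      have hrest : rest.length ≤ n := by simpa using h
      have ihM := (ih rest hrest).1
      have ihT := (ih rest hrest).2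
      by_cases hc : c = '<'
      · subst hc
        constructor
        · -- Main, '<' case: A skips the tag (break on no '>'); B drops the empty leading chunk
          simp [auxA, splitLt, gB]
          rw [ihT]
          split <;> simp_all
        · -- Tag, '<' case: '<' is not '>', both sides recurse on rest
          simp [splitLt, skipGt, afterGt, ihT]
      · have hsplit := splitLt_ne_nil rest
        obtain ⟨hh, tt, hht⟩ := List.exists_cons_of_ne_nil hsplit
        by_cases hgt : c = '>'
        · subst hgt
          constructor
          · -- Main, '>' case: ordinary character for A; B prepends it to the first chunk
            simp [auxA, splitLt, gB, hc, hht, ihM]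
          · -- Tag, '>' case: the tag closes; the rest of the chunk is visible
            have ha : afterGt ('>' :: hh) = hh := by simp [afterGt, List.dropWhile]
            simp [splitLt, skipGt, hht, ha, ihM, gB]
        · constructor
          · -- Main, ordinary character
            simp [auxA, splitLt, gB, hc, hht, ihM]
          · -- Tag, ordinary character: dropped by A (inside the tag) and by afterGt's dropWhile
            have ha : afterGt (c :: hh) = afterGt hh := by
              simp [afterGt, List.dropWhile, hgt]
            simp only [skipGt]
            rw [if_neg hgt, ← ihT]
            simp [splitLt, hc, hht, ha]

-- ===== VERDICT (by name: the statement is the Claim_ definition above) =====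
theorem extract_visible_text_py_spec : Claim_equal_extract_visible_text_py := by
  intro html _
  unfold Spec_extract_visible_text_py extract_visible_text_py extract_visible_text_py_alt
  have hm := (main_and_tag html.toList.length html.toList le_rfl).1
  obtain ⟨hh, tt, hht⟩ := List.exists_cons_of_ne_nil (splitLt_ne_nil html.toList)
  rw [hm, hht]
  simp [gB]
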